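-- pv_equiv track=rewrite | github.com/shakirovaleksandrrr/PPP_25-26_1sem | 1lab/main.py | get_all_islands
-- ===== SOURCE A (Python) =====
-- def island_size(field, i, j, visited):
--     #замер острова
--     if i < 0 or j < 0:
--         return 0
--     if i >= len(field) or j >= len(field[0]):
--         return 0
--     if field[i][j] == 0 or visited[i][j]:
--         return 0
--
--     visited[i][j] = True
--     size = 1
--     # Проверка всех соседних клеток и добавление к размеру
--     size += island_size(field, i - 1, j, visited)
--     size += island_size(field, i + 1, j, visited)
--     size += island_size(field, i, j - 1, visited)
--     size += island_size(field, i, j + 1, visited)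
--
--     return size
--
-- def get_all_islands(field):
--     #сбор списка островов
--     if not field:
--         return []
--
--     n = len(field)
--     m = len(field[0])
--
--     visited = []
--     for i in range(n):
--         visited.append([False] * m)
--
--     islands = []
--
--     for i in range(n):
--         for j in range(m):
--             if field[i][j] == 1 and not visited[i][j]:
--                 size = island_size(field, i, j, visited)
--                 islands.append(size)
--
--     return islands
-- ===== SOURCE B (Python) =====
-- def get_all_islands(field):
--     # single flattened scan + explicit-stack flood fill over a coordinate set
--     if not field:
--         return []
--     n = len(field)
--     m = len(field[0])
--     seen = set()
--     sizes = []
--     for idx in range(n * m):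
--         i, j = divmod(idx, m)
--         if field[i][j] == 1 and (i, j) not in seen:
--             size = 0
--             todo = [(i, j)]
--             while todo:
--                 a, b = todo.pop()
--                 if not (0 <= a < n and 0 <= b < m):
--                     continue
--                 if field[a][b] == 0 or (a, b) in seen:
--                     continue
--                 seen.add((a, b))
--                 size += 1
--                 todo += [(a, b + 1), (a, b - 1), (a + 1, b), (a - 1, b)]
--             sizes.append(size)
--     return sizes
-- ===== Notes on version B (the rewrite author's own statement) =====
-- stated objective: alternative
-- what changed: Replaces the recursive island_size with an explicit-stack flood fill over a set of coordinate tuples (no visited matrix), and the nested row/column scan with a single flattened index loop using divmod.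
import Mathlib
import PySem

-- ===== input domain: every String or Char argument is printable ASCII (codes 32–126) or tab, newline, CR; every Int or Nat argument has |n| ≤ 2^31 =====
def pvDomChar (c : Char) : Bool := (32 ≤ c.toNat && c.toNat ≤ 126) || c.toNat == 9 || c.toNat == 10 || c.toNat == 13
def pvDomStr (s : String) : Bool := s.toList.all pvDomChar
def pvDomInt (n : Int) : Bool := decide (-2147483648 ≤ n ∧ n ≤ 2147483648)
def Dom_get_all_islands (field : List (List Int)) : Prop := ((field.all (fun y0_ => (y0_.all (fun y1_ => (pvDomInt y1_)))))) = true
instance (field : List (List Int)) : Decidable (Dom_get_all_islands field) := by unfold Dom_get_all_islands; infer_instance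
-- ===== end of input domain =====

-- B replaces A's recursive flood fill over a visited MATRIX and nested row/column scan by an
-- explicit-stack flood fill over a SET of coordinate pairs driven by one flattened divmod-indexed
-- loop; equivalence of the RETURN values is proved on Pre_ (grids whose rows are at least as long
-- as the first row; elsewhere Python A raises IndexError).

-- ===== PORT A =====
def pvCell (field : List (List Int)) (i j : Int) : Int :=
  (field.getD i.toNat []).getD j.toNat 0

def pvVget (v : List (List Bool)) (i j : Int) : Bool :=
  (v.getD i.toNat []).getD j.toNat false

def pvVset (v : List (List Bool)) (i j : Int) : List (List Bool) :=
  v.set i.toNat ((v.getD i.toNat []).set j.toNat true)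

-- number of unvisited cells; used only as a fuel bound making the ports total
def pvCF (v : List (List Bool)) : Nat := (v.map (fun r => r.count false)).sum

-- recursive island_size of A; fuel (pvCF v + 1) always suffices (proved below)
def dfsA (field : List (List Int)) : Nat → Int → Int → List (List Bool) → Nat × List (List Bool)
  | 0, _, _, v => (0, v)
  | f+1, i, j, v =>
    if i < 0 ∨ j < 0 then (0, v)
    else if (field.length : Int) ≤ i ∨ ((field.headD []).length : Int) ≤ j then (0, v)
    else if pvCell field i j = 0 ∨ pvVget v i j = true then (0, v)
    else
      let v1 := pvVset v i j
      let r1 := dfsA field f (i-1) j v1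
      let r2 := dfsA field f (i+1) j r1.2
      let r3 := dfsA field f i (j-1) r2.2
      let r4 := dfsA field f i (j+1) r3.2
      (1 + r1.1 + r2.1 + r3.1 + r4.1, r4.2)

def stepA (field : List (List Int)) (i : Nat) (st : List (List Bool) × List Int) (j : Nat) :
    List (List Bool) × List Int :=
  if pvCell field (i : Int) (j : Int) = 1 ∧ pvVget st.1 (i : Int) (j : Int) = false then
    let r := dfsA field (pvCF st.1 + 1) (i : Int) (j : Int) st.1
    (r.2, st.2 ++ [(r.1 : Int)])
  else st

def get_all_islands (field : List (List Int)) : List Int :=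
  if field.length = 0 then []
  else
    ((List.range field.length).foldl
      (fun st i => (List.range (field.headD []).length).foldl (stepA field i) st)
      (List.replicate field.length (List.replicate (field.headD []).length false),
       ([] : List Int))).2

-- ===== PORT B =====
-- the while loop of B: pop a coordinate, skip it unless in-range / nonzero / unseen, otherwise
-- record it in the seen set and push its four neighbours; fuel 4*(cells−|seen|)+1 always suffices
def loopB (field : List (List Int)) :
    Nat → List (Int × Int) → List (Int × Int) → Nat → Nat × List (Int × Int)
  | _, [], seen, c => (c, seen)
  | 0, _ :: _, seen, c => (c, seen)
  | f+1, (a, b) :: rest, seen, c =>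
    if ¬ (0 ≤ a ∧ a < (field.length : Int) ∧ 0 ≤ b ∧ b < ((field.headD []).length : Int)) then
      loopB field f rest seen c
    else if pvCell field a b = 0 ∨ (a, b) ∈ seen then
      loopB field f rest seen c
    else
      loopB field f ((a-1, b) :: (a+1, b) :: (a, b-1) :: (a, b+1) :: rest)
        (seen ++ [(a, b)]) (c + 1)

def stepB (field : List (List Int)) (st : List (Int × Int) × List Int) (idx : Int) :
    List (Int × Int) × List Int :=
  let i := PySem.Int.floordiv idx ((field.headD []).length : Int)
  let j := PySem.Int.mod idx ((field.headD []).length : Int)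
  if pvCell field i j = 1 ∧ (i, j) ∉ st.1 then
    let r := loopB field
      (4 * (field.length * (field.headD []).length - st.1.length) + 1) [(i, j)] st.1 0
    (r.2, st.2 ++ [(r.1 : Int)])
  else st

def get_all_islands_alt (field : List (List Int)) : List Int :=
  if field.length = 0 then []
  else
    ((PySem.List.pyRange 0 ((field.length : Int) * ((field.headD []).length : Int)) 1).foldl
      (stepB field) (([] : List (Int × Int)), ([] : List Int))).2

-- ===== PRECONDITION & SPEC =====
-- Pre_ excludes exactly the ragged grids with a row shorter than the first row, on which
-- Python A raises IndexError.
def Pre_get_all_islands (field : List (List Int)) : Prop :=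
  ∀ row ∈ field, (field.headD []).length ≤ row.length
instance (field : List (List Int)) : Decidable (Pre_get_all_islands field) := by
  unfold Pre_get_all_islands; infer_instance

def pvWitness_get_all_islands : List (List Int) := [[1, 0], [1, 1]]

def Spec_get_all_islands (field : List (List Int)) (out : List Int) : Prop :=
  out = get_all_islands_alt field
instance (field : List (List Int)) (out : List Int) : Decidable (Spec_get_all_islands field out) := by
  unfold Spec_get_all_islands; infer_instance

-- ===== CLAIM (what is proved, stated in full; the proofs are below) =====
def Claim_equal_get_all_islands : Prop := ∀ (field : List (List Int)),
  Dom_get_all_islands field → Pre_get_all_islands field →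
  Spec_get_all_islands field (get_all_islands field)

-- ===== LEMMAS AND PROOFS =====

-- visited grid has the same shape as the field
def pvDims (field : List (List Int)) (v : List (List Bool)) : Prop :=
  v.length = field.length ∧ ∀ r ∈ v, r.length = (field.headD []).length

-- coupling invariant between A's visited matrix and B's seen set
def RelV (field : List (List Int)) (v : List (List Bool)) (seen : List (Int × Int)) : Prop :=
  pvDims field v ∧
  pvCF v + seen.length = field.length * (field.headD []).length ∧
  ∀ x y : Int, 0 ≤ x → x < (field.length : Int) → 0 ≤ y → y < ((field.headD []).length : Int) →
    (pvVget v x y = true ↔ (x, y) ∈ seen)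

lemma count_set (r : List Bool) (j : Nat) (hj : j < r.length)
    (hf : r.getD j false = false) :
    (r.set j true).count false + 1 = r.count false := by
  induction r generalizing j with
  | nil => simp at hj
  | cons b t ih =>
    cases j with
    | zero => simp_all [List.count_cons]
    | succ j =>
      simp only [List.length_cons, Nat.succ_lt_succ_iff] at hj
      simp only [List.getD_cons_succ] at hf
      have := ih j hj hf
      simp only [List.set_cons_succ, List.count_cons]
      omega

lemma cf_set2 (v : List (List Bool)) (k l : Nat) (hk : k < v.length)
    (hl : l < (v.getD k []).length) (hf : (v.getD k []).getD l false = false) :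
    pvCF (v.set k ((v.getD k []).set l true)) + 1 = pvCF v := by
  induction v generalizing k with
  | nil => simp at hk
  | cons r t ih =>
    cases k with
    | zero =>
      simp only [List.getD_cons_zero] at hl hf
      have := count_set r l hl hf
      simp only [List.getD_cons_zero, List.set_cons_zero, pvCF, List.map_cons, List.sum_cons]
      omega
    | succ k =>
      simp only [List.length_cons, Nat.succ_lt_succ_iff] at hk
      simp only [List.getD_cons_succ] at hl hf
      have := ih k hk hl hf
      simp [pvCF] at this ⊢
      omega

lemma step_facts (field : List (List Int)) (v : List (List Bool)) (i j : Int)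
    (hd : pvDims field v)
    (h1 : ¬ (i < 0 ∨ j < 0))
    (h2 : ¬ ((field.length : Int) ≤ i ∨ ((field.headD []).length : Int) ≤ j))
    (h3 : pvVget v i j = false) :
    pvCF (pvVset v i j) + 1 = pvCF v ∧ pvDims field (pvVset v i j) := by
  push_neg at h1 h2
  have hk : i.toNat < v.length := by rw [hd.1]; omega
  have hrow : (v.getD i.toNat []) ∈ v := by
    rw [List.getD_eq_getElem v [] hk]; exact List.getElem_mem hk
  have hrl : (v.getD i.toNat []).length = (field.headD []).length := hd.2 _ hrow
  have hl : j.toNat < (v.getD i.toNat []).length := by omega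
  constructor
  · exact cf_set2 v i.toNat j.toNat hk hl h3
  · refine ⟨by simpa [pvVset] using hd.1, ?_⟩
    intro r hr
    rcases List.mem_or_eq_of_mem_set hr with h | h
    · exact hd.2 _ h
    · subst h; simpa using hrl

-- dfsA preserves the shape and never increases the number of unvisited cells
lemma dfsA_mono (field : List (List Int)) (f : Nat) :
    ∀ (i j : Int) (v : List (List Bool)), pvDims field v →
      pvDims field (dfsA field f i j v).2 ∧ pvCF (dfsA field f i j v).2 ≤ pvCF v := by
  induction f with
  | zero => intro i j v hd; simp [dfsA, hd]
  | succ f ih =>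
    intro i j v hd
    rw [dfsA]
    split_ifs with g1 g2 g3
    · exact ⟨hd, le_refl _⟩
    · exact ⟨hd, le_refl _⟩
    · exact ⟨hd, le_refl _⟩
    · have h3 : pvVget v i j = false := by
        rcases not_or.mp g3 with ⟨_, h⟩; simpa using h
      obtain ⟨hcf, hd1⟩ := step_facts field v i j hd g1 g2 h3
      dsimp only
      obtain ⟨d1, m1⟩ := ih (i-1) j _ hd1
      obtain ⟨d2, m2⟩ := ih (i+1) j _ d1
      obtain ⟨d3, m3⟩ := ih i (j-1) _ d2
      obtain ⟨d4, m4⟩ := ih i (j+1) _ d3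
      exact ⟨d4, by omega⟩

-- any sufficient fuel gives the same result
lemma dfsA_fuel (field : List (List Int)) (k : Nat) :
    ∀ (v : List (List Bool)) (i j : Int) (f g : Nat), pvDims field v → pvCF v ≤ k →
      pvCF v < f → pvCF v < g → dfsA field f i j v = dfsA field g i j v := by
  induction k with
  | zero =>
    intro v i j f g hd hk hf hg
    obtain ⟨f, rfl⟩ : ∃ f', f = f' + 1 := ⟨f - 1, by omega⟩
    obtain ⟨g, rfl⟩ : ∃ g', g = g' + 1 := ⟨g - 1, by omega⟩
    rw [dfsA, dfsA]
    split_ifs with g1 g2 g3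
    · rfl
    · rfl
    · rfl
    · exfalso
      have h3 : pvVget v i j = false := by
        rcases not_or.mp g3 with ⟨_, h⟩; simpa using h
      obtain ⟨hcf, _⟩ := step_facts field v i j hd g1 g2 h3
      omega
  | succ k ih =>
    intro v i j f g hd hk hf hg
    obtain ⟨f, rfl⟩ : ∃ f', f = f' + 1 := ⟨f - 1, by omega⟩
    obtain ⟨g, rfl⟩ : ∃ g', g = g' + 1 := ⟨g - 1, by omega⟩
    rw [dfsA, dfsA]
    split_ifs with g1 g2 g3
    · rfl
    · rfl
    · rfl
    · have h3 : pvVget v i j = false := by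
        rcases not_or.mp g3 with ⟨_, h⟩; simpa using h
      obtain ⟨hcf, hd1⟩ := step_facts field v i j hd g1 g2 h3
      simp only
      have e1 : dfsA field f (i-1) j (pvVset v i j) = dfsA field g (i-1) j (pvVset v i j) :=
        ih _ _ _ _ _ hd1 (by omega) (by omega) (by omega)
      rw [e1]
      obtain ⟨d1, m1⟩ := dfsA_mono field g (i-1) j _ hd1
      have e2 := ih (dfsA field g (i-1) j (pvVset v i j)).2 (i+1) j f g d1
        (by omega) (by omega) (by omega)
      rw [e2]
      obtain ⟨d2, m2⟩ := dfsA_mono field g (i+1) j _ d1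
      have e3 := ih (dfsA field g (i+1) j (dfsA field g (i-1) j (pvVset v i j)).2).2
        i (j-1) f g d2 (by omega) (by omega) (by omega)
      rw [e3]
      obtain ⟨d3, m3⟩ := dfsA_mono field g i (j-1) _ d2
      have e4 := ih _ i (j+1) f g d3 (by omega) (by omega) (by omega)
      rw [e4]

-- reading the matrix after a single mark
lemma pvVget_pvVset (field : List (List Int)) (v : List (List Bool)) (hd : pvDims field v)
    (i j x y : Int)
    (h0i : 0 ≤ i) (hin : i < (field.length : Int))
    (h0j : 0 ≤ j) (hjm : j < ((field.headD []).length : Int))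
    (h0x : 0 ≤ x) (hxn : x < (field.length : Int))
    (h0y : 0 ≤ y) (hym : y < ((field.headD []).length : Int)) :
    pvVget (pvVset v i j) x y = if x = i ∧ y = j then true else pvVget v x y := by
  obtain ⟨hlen, hrow⟩ := hd
  have hxv : x.toNat < v.length := by omega
  have hiv : i.toNat < v.length := by omega
  have hgi : v.getD i.toNat [] = v[i.toNat] := List.getD_eq_getElem v [] hiv
  have hrl : v[i.toNat].length = (field.headD []).length := hrow _ (List.getElem_mem hiv)
  unfold pvVget pvVset
  rw [hgi]
  have hxl : x.toNat < (v.set i.toNat (v[i.toNat].set j.toNat true)).length := by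
    simpa using hxv
  rw [List.getD_eq_getElem _ _ hxl]
  by_cases hxi : x = i
  · subst hxi
    have h1 : (v.set x.toNat (v[x.toNat].set j.toNat true))[x.toNat]'hxl
        = v[x.toNat].set j.toNat true := by simp
    rw [h1]
    have hyl : y.toNat < (v[x.toNat].set j.toNat true).length := by
      simp only [List.length_set, hrl]; omega
    rw [List.getD_eq_getElem _ _ hyl]
    by_cases hyj : y = j
    · subst hyj; simp
    · have hne : j.toNat ≠ y.toNat := by omega
      rw [List.getElem_set_ne hne, if_neg (by tauto)]
      rw [List.getD_eq_getElem v [] hxv, List.getD_eq_getElem _ _ (by rw [hrl]; omega)]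
  · have hne : i.toNat ≠ x.toNat := by omega
    rw [List.getElem_set_ne hne, if_neg (by tauto)]
    rw [List.getD_eq_getElem v [] hxv]

-- marking a fresh in-range cell preserves the coupling invariant
lemma rel_mark (field : List (List Int)) (v : List (List Bool)) (seen : List (Int × Int))
    (i j : Int) (hr : RelV field v seen)
    (h0i : 0 ≤ i) (hin : i < (field.length : Int))
    (h0j : 0 ≤ j) (hjm : j < ((field.headD []).length : Int))
    (hfresh : pvVget v i j = false) :
    RelV field (pvVset v i j) (seen ++ [(i, j)]) ∧ pvCF (pvVset v i j) + 1 = pvCF v := by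
  obtain ⟨hd, hcnt, hiff⟩ := hr
  have h1 : ¬ (i < 0 ∨ j < 0) := by omega
  have h2 : ¬ ((field.length : Int) ≤ i ∨ ((field.headD []).length : Int) ≤ j) := by omega
  obtain ⟨hcf, hd'⟩ := step_facts field v i j hd h1 h2 hfresh
  refine ⟨⟨hd', ?_, ?_⟩, hcf⟩
  · simp only [List.length_append, List.length_cons, List.length_nil]; omega
  · intro x y h0x hxn h0y hym
    rw [pvVget_pvVset field v hd i j x y h0i hin h0j hjm h0x hxn h0y hym]
    by_cases hxy : x = i ∧ y = j
    · simp [hxy.1, hxy.2]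
    · rw [if_neg hxy, hiff x y h0x hxn h0y hym]
      simp only [List.mem_append, List.mem_singleton, Prod.mk.injEq]
      tauto

-- dfsA on an out-of-range cell
lemma dfsA_out (field : List (List Int)) (f : Nat) (i j : Int) (v : List (List Bool))
    (h : ¬ (0 ≤ i ∧ i < (field.length : Int) ∧ 0 ≤ j ∧ j < ((field.headD []).length : Int))) :
    dfsA field (f + 1) i j v = (0, v) := by
  rw [dfsA]
  by_cases h1 : i < 0 ∨ j < 0
  · rw [if_pos h1]
  · rw [if_neg h1, if_pos (by omega)]

-- dfsA on a zero or visited in-range cell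
lemma dfsA_stop (field : List (List Int)) (f : Nat) (i j : Int) (v : List (List Bool))
    (hb : 0 ≤ i ∧ i < (field.length : Int) ∧ 0 ≤ j ∧ j < ((field.headD []).length : Int))
    (h : pvCell field i j = 0 ∨ pvVget v i j = true) :
    dfsA field (f + 1) i j v = (0, v) := by
  rw [dfsA, if_neg (by omega), if_neg (by omega), if_pos h]

-- the explicit stack run of B computes, per popped seed, exactly A's recursive dfs
lemma bridgeR (field : List (List Int)) (k : Nat) :
    ∀ (v : List (List Bool)) (seen : List (Int × Int)), RelV field v seen → pvCF v ≤ k →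
      ∀ (i j : Int) (rest : List (Int × Int)) (c : Nat),
      ∃ seen₂, RelV field (dfsA field (pvCF v + 1) i j v).2 seen₂ ∧
        loopB field (4 * pvCF v + rest.length + 1) ((i, j) :: rest) seen c
        = loopB field (4 * pvCF (dfsA field (pvCF v + 1) i j v).2 + rest.length) rest seen₂
            (c + (dfsA field (pvCF v + 1) i j v).1) := by
  induction k with
  | zero =>
    intro v seen hr hk i j rest c
    by_cases hb : 0 ≤ i ∧ i < (field.length : Int) ∧ 0 ≤ j ∧ j < ((field.headD []).length : Int)
    · have hgv : pvVget v i j = true ↔ (i, j) ∈ seen :=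
        hr.2.2 i j hb.1 hb.2.1 hb.2.2.1 hb.2.2.2
      by_cases hs : pvCell field i j = 0 ∨ (i, j) ∈ seen
      · have hD := dfsA_stop field (pvCF v) i j v hb (by tauto)
        refine ⟨seen, by rw [hD]; exact hr, ?_⟩
        rw [hD, loopB, if_neg (not_not_intro hb), if_pos hs]
        simp
      · exfalso
        have hfresh : pvVget v i j = false := by
          rcases not_or.mp hs with ⟨_, h⟩
          cases hxx : pvVget v i j
          · rfl
          · exact absurd (hgv.mp hxx) h
        obtain ⟨_, hcf⟩ := rel_mark field v seen i j hr hb.1 hb.2.1 hb.2.2.1 hb.2.2.2 hfresh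
        omega
    · have hD := dfsA_out field (pvCF v) i j v hb
      refine ⟨seen, by rw [hD]; exact hr, ?_⟩
      rw [hD, loopB, if_pos hb]
      simp
  | succ k ih =>
    intro v seen hr hk i j rest c
    by_cases hb : 0 ≤ i ∧ i < (field.length : Int) ∧ 0 ≤ j ∧ j < ((field.headD []).length : Int)
    · have hgv : pvVget v i j = true ↔ (i, j) ∈ seen :=
        hr.2.2 i j hb.1 hb.2.1 hb.2.2.1 hb.2.2.2
      by_cases hs : pvCell field i j = 0 ∨ (i, j) ∈ seen
      · have hD := dfsA_stop field (pvCF v) i j v hb (by tauto)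
        refine ⟨seen, by rw [hD]; exact hr, ?_⟩
        rw [hD, loopB, if_neg (not_not_intro hb), if_pos hs]
        simp
      · -- mark branch
        have hfresh : pvVget v i j = false := by
          rcases not_or.mp hs with ⟨_, h⟩
          cases hxx : pvVget v i j
          · rfl
          · exact absurd (hgv.mp hxx) h
        obtain ⟨hrel1, hcf⟩ := rel_mark field v seen i j hr hb.1 hb.2.1 hb.2.2.1 hb.2.2.2 hfresh
        have hsA : ¬ (pvCell field i j = 0 ∨ pvVget v i j = true) := by
          rcases not_or.mp hs with ⟨h0, _⟩
          simp [h0, hfresh]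
        have hfv : pvCF v = pvCF (pvVset v i j) + 1 := by omega
        set v1 := pvVset v i j with hv1
        set seen1 := seen ++ [(i, j)] with hs1
        set r1 := dfsA field (pvCF v1 + 1) (i - 1) j v1 with hr1
        obtain ⟨d1, m1⟩ := dfsA_mono field (pvCF v1 + 1) (i - 1) j v1 hrel1.1
        rw [← hr1] at d1 m1
        set r2 := dfsA field (pvCF r1.2 + 1) (i + 1) j r1.2 with hr2
        obtain ⟨d2, m2⟩ := dfsA_mono field (pvCF r1.2 + 1) (i + 1) j r1.2 d1
        rw [← hr2] at d2 m2
        set r3 := dfsA field (pvCF r2.2 + 1) i (j - 1) r2.2 with hr3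
        obtain ⟨d3, m3⟩ := dfsA_mono field (pvCF r2.2 + 1) i (j - 1) r2.2 d2
        rw [← hr3] at d3 m3
        set r4 := dfsA field (pvCF r3.2 + 1) i (j + 1) r3.2 with hr4
        obtain ⟨d4, m4⟩ := dfsA_mono field (pvCF r3.2 + 1) i (j + 1) r3.2 d3
        rw [← hr4] at d4 m4
        have hD : dfsA field (pvCF v + 1) i j v
            = (1 + r1.1 + r2.1 + r3.1 + r4.1, r4.2) := by
          rw [dfsA, if_neg (by omega), if_neg (by omega), if_neg hsA]
          simp only [← hv1, hfv]
          have e2 : dfsA field (pvCF v1 + 1) (i + 1) j r1.2 = r2 := by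
            rw [hr2]
            exact dfsA_fuel field (pvCF v1) r1.2 (i + 1) j _ _ d1 (by omega) (by omega) (by omega)
          have e3 : dfsA field (pvCF v1 + 1) i (j - 1) r2.2 = r3 := by
            rw [hr3]
            exact dfsA_fuel field (pvCF v1) r2.2 i (j - 1) _ _ d2 (by omega) (by omega) (by omega)
          have e4 : dfsA field (pvCF v1 + 1) i (j + 1) r3.2 = r4 := by
            rw [hr4]
            exact dfsA_fuel field (pvCF v1) r3.2 i (j + 1) _ _ d3 (by omega) (by omega) (by omega)
          rw [← hr1, e2, e3, e4]
        -- now run the four seeds through the stack on B's side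
        have hk1 : pvCF v1 ≤ k := by omega
        obtain ⟨s1, hq1, he1⟩ := ih v1 seen1 hrel1 hk1 (i - 1) j
          ((i + 1, j) :: (i, j - 1) :: (i, j + 1) :: rest) (c + 1)
        rw [← hr1] at hq1 he1
        obtain ⟨s2, hq2, he2⟩ := ih r1.2 s1 hq1 (by omega) (i + 1) j
          ((i, j - 1) :: (i, j + 1) :: rest) (c + 1 + r1.1)
        rw [← hr2] at hq2 he2
        obtain ⟨s3, hq3, he3⟩ := ih r2.2 s2 hq2 (by omega) i (j - 1)
          ((i, j + 1) :: rest) (c + 1 + r1.1 + r2.1)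
        rw [← hr3] at hq3 he3
        obtain ⟨s4, hq4, he4⟩ := ih r3.2 s3 hq3 (by omega) i (j + 1)
          rest (c + 1 + r1.1 + r2.1 + r3.1)
        rw [← hr4] at hq4 he4
        refine ⟨s4, by rw [hD]; exact hq4, ?_⟩
        rw [hD]
        rw [loopB, if_neg (not_not_intro hb), if_neg hs]
        rw [show 4 * pvCF v + rest.length
            = 4 * pvCF v1 + ((i + 1, j) :: (i, j - 1) :: (i, j + 1) :: rest).length + 1 by
          simp [List.length_cons]; omega]
        rw [he1]
        rw [show ((i + 1, j) :: (i, j - 1) :: (i, j + 1) :: rest).length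
            = ((i, j - 1) :: (i, j + 1) :: rest).length + 1 from rfl]
        rw [show 4 * pvCF r1.2 + (((i, j - 1) :: (i, j + 1) :: rest).length + 1)
            = 4 * pvCF r1.2 + ((i, j - 1) :: (i, j + 1) :: rest).length + 1 by omega]
        rw [he2]
        rw [show ((i, j - 1) :: (i, j + 1) :: rest).length
            = ((i, j + 1) :: rest).length + 1 from rfl]
        rw [show 4 * pvCF r2.2 + (((i, j + 1) :: rest).length + 1)
            = 4 * pvCF r2.2 + ((i, j + 1) :: rest).length + 1 by omega]
        rw [he3]
        rw [show ((i, j + 1) :: rest).length = rest.length + 1 from rfl]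
        rw [show 4 * pvCF r3.2 + (rest.length + 1) = 4 * pvCF r3.2 + rest.length + 1 by omega]
        rw [he4]
        congr 1
        omega
    · have hD := dfsA_out field (pvCF v) i j v hb
      refine ⟨seen, by rw [hD]; exact hr, ?_⟩
      rw [hD, loopB, if_pos hb]
      simp

lemma seed_eq (field : List (List Int)) (v : List (List Bool)) (seen : List (Int × Int))
    (i j : Int) (hr : RelV field v seen) :
    ∃ seen₂, RelV field (dfsA field (pvCF v + 1) i j v).2 seen₂ ∧
      loopB field (4 * pvCF v + 1) [(i, j)] seen 0
        = ((dfsA field (pvCF v + 1) i j v).1, seen₂) := by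
  obtain ⟨s2, hq, he⟩ := bridgeR field (pvCF v) v seen hr (le_refl _) i j [] 0
  refine ⟨s2, hq, ?_⟩
  simp only [List.length_nil, Nat.add_zero, Nat.zero_add] at he
  rw [he, loopB]

lemma encode_divmod (i j m : Nat) (hj : j < m) :
    PySem.Int.floordiv ((i * m + j : Nat) : Int) (m : Int) = (i : Int) ∧
    PySem.Int.mod ((i * m + j : Nat) : Int) (m : Int) = (j : Int) := by
  constructor
  · rw [PySem.Int.floordiv_natCast]
    have h : (i * m + j) / m = i := by
      rw [Nat.mul_comm, Nat.mul_add_div (by omega), Nat.div_eq_of_lt hj]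
      omega
    simp [h]
  · rw [PySem.Int.mod_natCast]
    have h : (i * m + j) % m = j := by
      rw [Nat.mul_comm, Nat.mul_add_mod, Nat.mod_eq_of_lt hj]
    simp [h]


lemma cell_step (field : List (List Int)) (i j : Nat)
    (hi : i < field.length) (hj : j < (field.headD []).length)
    (stA : List (List Bool) × List Int) (stB : List (Int × Int) × List Int)
    (hrel : RelV field stA.1 stB.1) (hout : stA.2 = stB.2) :
    RelV field (stepA field i stA j).1
        (stepB field stB ((i * (field.headD []).length + j : Nat) : Int)).1 ∧
      (stepA field i stA j).2
        = (stepB field stB ((i * (field.headD []).length + j : Nat) : Int)).2 := by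
  obtain ⟨hdiv, hmod⟩ := encode_divmod i j (field.headD []).length hj
  unfold stepA stepB
  simp only [hdiv, hmod]
  have hvm : pvVget stA.1 (i : Int) (j : Int) = true ↔ ((i : Int), (j : Int)) ∈ stB.1 :=
    hrel.2.2 _ _ (by positivity) (by exact_mod_cast hi) (by positivity) (by exact_mod_cast hj)
  by_cases hc : pvCell field (i : Int) (j : Int) = 1 ∧ pvVget stA.1 (i : Int) (j : Int) = false
  · have hc' : pvCell field (i : Int) (j : Int) = 1 ∧ ((i : Int), (j : Int)) ∉ stB.1 :=
      ⟨hc.1, by rw [← hvm]; simp [hc.2]⟩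
    rw [if_pos hc, if_pos hc']
    have hlen : field.length * (field.headD []).length - stB.1.length = pvCF stA.1 := by
      have := hrel.2.1; omega
    rw [hlen]
    obtain ⟨s2, hq, he⟩ := seed_eq field stA.1 stB.1 (i : Int) (j : Int) hrel
    rw [he]
    exact ⟨hq, by rw [hout]⟩
  · have hc' : ¬ (pvCell field (i : Int) (j : Int) = 1 ∧ ((i : Int), (j : Int)) ∉ stB.1) := by
      intro hh
      apply hc
      refine ⟨hh.1, ?_⟩
      cases hxx : pvVget stA.1 (i : Int) (j : Int)
      · rfl
      · exact absurd (hvm.mp hxx) hh.2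
    rw [if_neg hc, if_neg hc']
    exact ⟨hrel, hout⟩

lemma row_eq (field : List (List Int)) (i : Nat) (hi : i < field.length) :
    ∀ (js : List Nat), (∀ j ∈ js, j < (field.headD []).length) →
      ∀ stA stB, RelV field stA.1 stB.1 → stA.2 = stB.2 →
        RelV field (js.foldl (stepA field i) stA).1
            (js.foldl (fun st j => stepB field st ((i * (field.headD []).length + j : Nat) : Int)) stB).1 ∧
          (js.foldl (stepA field i) stA).2
            = (js.foldl (fun st j => stepB field st ((i * (field.headD []).length + j : Nat) : Int)) stB).2 := by
  intro js
  induction js with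
  | nil => exact fun _ stA stB h1 h2 => ⟨h1, h2⟩
  | cons j t iht =>
    intro hlt stA stB h1 h2
    obtain ⟨ha, hb⟩ := cell_step field i j hi (hlt j (by simp)) stA stB h1 h2
    simp only [List.foldl_cons]
    exact iht (fun x hx => hlt x (by simp [hx])) _ _ ha hb

lemma rows_eq (field : List (List Int)) :
    ∀ (r : Nat), r ≤ field.length →
      ∀ stA stB, RelV field stA.1 stB.1 → stA.2 = stB.2 →
        RelV field ((List.range r).foldl
            (fun st i => (List.range (field.headD []).length).foldl (stepA field i) st) stA).1
            (((List.range (r * (field.headD []).length)).map (fun (k : Nat) => (k : Int))).foldl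
              (stepB field) stB).1 ∧
          ((List.range r).foldl
            (fun st i => (List.range (field.headD []).length).foldl (stepA field i) st) stA).2
            = (((List.range (r * (field.headD []).length)).map (fun (k : Nat) => (k : Int))).foldl
              (stepB field) stB).2 := by
  intro r
  induction r with
  | zero => intro _ stA stB h1 h2; simpa using ⟨h1, h2⟩
  | succ r ihr =>
    intro hrle stA stB h1 h2
    rw [List.range_succ, Nat.succ_mul, List.range_add, List.map_append,
      List.foldl_append, List.foldl_append, List.map_map, List.foldl_map]
    obtain ⟨ha, hb⟩ := ihr (by omega) stA stB h1 h2
    have hrow := row_eq field r (by omega) (List.range (field.headD []).length)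
      (fun j hj => List.mem_range.mp hj) _ _ ha hb
    simpa [Function.comp] using hrow

lemma rel_init (field : List (List Int)) :
    RelV field (List.replicate field.length (List.replicate (field.headD []).length false)) [] := by
  refine ⟨⟨by simp, ?_⟩, ?_, ?_⟩
  · intro row hrow
    rw [List.eq_of_mem_replicate hrow]
    simp
  · simp [pvCF, List.map_replicate, List.sum_replicate]
  · intro x y h0x hxn h0y hym
    simp only [pvVget, List.getD, List.getElem?_replicate, List.not_mem_nil, iff_false]
    split_ifs with hx
    · simp only [Option.getD_some, List.getElem?_replicate]
      split <;> simp
    · simp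

-- ===== VERDICT (by name: the statement is the Claim_ definition above) =====
theorem get_all_islands_spec : Claim_equal_get_all_islands := by
  intro field _ _
  unfold Spec_get_all_islands get_all_islands get_all_islands_alt
  split_ifs with h
  · rfl
  · have hroweq := rows_eq field field.length (le_refl _)
      (List.replicate field.length (List.replicate (field.headD []).length false), ([] : List Int))
      (([] : List (Int × Int)), ([] : List Int)) (rel_init field) rfl
    have hpr : PySem.List.pyRange 0 ((field.length : Int) * ((field.headD []).length : Int)) 1
        = (List.range (field.length * (field.headD []).length)).map (fun (k : Nat) => (k : Int)) := by
      rw [PySem.List.pyRange_one]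
      have h0 : ((field.length : Int) * ((field.headD []).length : Int) - 0)
          = ((field.length * (field.headD []).length : Nat) : Int) := by push_cast; ring
      rw [h0, Int.toNat_natCast]
      simp
    rw [hpr]
    exact hroweq.2
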